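-- pv_equiv track=rewrite | github.com/TuanSOC/ProJect-AI-Unsupervised | optimized_sqli_detector.py | is_base64_string
-- ===== SOURCE A (Python) =====
-- def is_base64_string(s: str) -> bool:
--     """
--     Check if string looks like base64 with improved validation
--
--     Enhanced checks:
--     - Minimum length requirement
--     - Valid Base64 character set
--     - Proper length (multiple of 4)
--     - Not too long (performance)
--     - Contains meaningful Base64 patterns
--     """
--     if not s or len(s) < 4:
--         return False
--
--     # Skip very large strings
--     if len(s) > 4096:
--         return False
--
--     try:
--         # Base64 characters: A-Z, a-z, 0-9, +, /, =
--         base64_chars = set('ABCDEFGHIJKLMNOPQRSTUVWXYZabcdefghijklmnopqrstuvwxyz0123456789+/=')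
--
--         # Check if all characters are valid Base64
--         if not all(c in base64_chars for c in s):
--             return False
--
--         # Check if length is reasonable for Base64 (multiple of 4, or close)
--         if len(s) % 4 not in [0, 1, 2, 3]:
--             return False
--
--         # Check if string contains meaningful Base64 patterns (not just random chars)
--         # Base64 typically has a good mix of different character types
--         has_upper = any(c.isupper() for c in s)
--         has_lower = any(c.islower() for c in s)
--         has_digit = any(c.isdigit() for c in s)
--         has_special = any(c in '+/' for c in s)
--
--         # If it has at least 3 different character types, it's likely Base64
--         char_types = sum([has_upper, has_lower, has_digit, has_special])
--         if char_types < 3: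
--             return False
--
--         return True
--
--     except Exception:
--         return False
-- ===== SOURCE B (Python) =====
-- def is_base64_string(s: str) -> bool:
--     if not s or len(s) < 4:
--         return False
--     if len(s) > 4096:
--         return False
--     try:
--         base64_chars = set('ABCDEFGHIJKLMNOPQRSTUVWXYZabcdefghijklmnopqrstuvwxyz0123456789+/=')
--         has_upper = has_lower = has_digit = has_special = False
--         for c in s:
--             if c not in base64_chars:
--                 return False
--             has_upper = has_upper or c.isupper()
--             has_lower = has_lower or c.islower()
--             has_digit = has_digit or c.isdigit()
--             has_special = has_special or c in '+/'
--         return has_upper + has_lower + has_digit + has_special >= 3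
--     except Exception:
--         return False
-- ===== Notes on version B (the rewrite author's own statement) =====
-- stated objective: simpler
-- what changed: Replaced A's five separate passes over the string (all() plus four any()) and the dead len%4 check with a single loop that validates each character and accumulates the four type flags at once.
import Mathlib
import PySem

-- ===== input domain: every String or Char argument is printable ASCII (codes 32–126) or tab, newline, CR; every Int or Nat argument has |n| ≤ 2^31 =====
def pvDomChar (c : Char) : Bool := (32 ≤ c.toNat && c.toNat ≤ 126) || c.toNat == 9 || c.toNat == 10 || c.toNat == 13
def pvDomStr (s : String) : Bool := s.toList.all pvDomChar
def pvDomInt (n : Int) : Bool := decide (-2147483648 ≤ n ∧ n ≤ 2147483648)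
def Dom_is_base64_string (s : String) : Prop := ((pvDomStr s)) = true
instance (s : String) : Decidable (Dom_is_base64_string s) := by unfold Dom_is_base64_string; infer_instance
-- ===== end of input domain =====

-- B replaces A's five separate passes (all() + four any()) and the dead len%4 test
-- with a single loop accumulating the four character-type flags (objective: simpler).

-- ===== PORT A =====
-- the Base64 alphabet literal used by both Pythons
def pvB64 : List Char :=
  "ABCDEFGHIJKLMNOPQRSTUVWXYZabcdefghijklmnopqrstuvwxyz0123456789+/=".toList

-- literal transliteration of A: guards, set of chars, all(), the %4 check, four any() passes, sum
def is_base64_string (s : String) : Bool :=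
  let cs := s.toList
  if cs.isEmpty || decide (cs.length < 4) then false
  else if decide (4096 < cs.length) then false
  else
    let base64_chars : PySem.Set Char := PySem.Set.ofList pvB64
    if !(cs.all fun c => PySem.Set.contains base64_chars c) then false
    else if !([0, 1, 2, 3].contains (cs.length % 4)) then false
    else
      let has_upper := cs.any fun c => PySem.Chars.isupper c
      let has_lower := cs.any fun c => PySem.Chars.islower c
      let has_digit := cs.any fun c => PySem.Chars.isdigit c
      -- 'c in "+/"' on a single char c is membership in {'+','/'} (exact here)
      let has_special := cs.any fun c => ['+', '/'].contains c
      let char_types : Nat := ([has_upper, has_lower, has_digit, has_special].map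
        fun b => if b then (1 : Nat) else 0).sum
      if decide (char_types < 3) then false else true

-- ===== PORT B =====
-- B's single loop: reject on an invalid char, otherwise fold the four flags
def pvLoop : List Char → PySem.Set Char → Bool → Bool → Bool → Bool → Bool
  | [], _, hu, hl, hd, hs =>
      decide (3 ≤ (if hu then (1 : Nat) else 0) + (if hl then 1 else 0)
                  + (if hd then 1 else 0) + (if hs then 1 else 0))
  | c :: cs, st, hu, hl, hd, hs =>
      if !(PySem.Set.contains st c) then false
      else pvLoop cs st (hu || PySem.Chars.isupper c) (hl || PySem.Chars.islower c)
             (hd || PySem.Chars.isdigit c) (hs || ['+', '/'].contains c)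

def is_base64_string_alt (s : String) : Bool :=
  let cs := s.toList
  if cs.isEmpty || decide (cs.length < 4) then false
  else if decide (4096 < cs.length) then false
  else pvLoop cs (PySem.Set.ofList pvB64) false false false false

-- ===== PRECONDITION & SPEC =====
def Spec_is_base64_string (s : String) (out : Bool) : Prop := out = is_base64_string_alt s
instance (s : String) (out : Bool) : Decidable (Spec_is_base64_string s out) := by unfold Spec_is_base64_string; infer_instance

-- ===== CLAIM (what is proved, stated in full; the proofs are below) =====
def Claim_equal_is_base64_string : Prop := ∀ (s : String), Dom_is_base64_string s → Spec_is_base64_string s (is_base64_string s)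

-- ===== LEMMAS AND PROOFS =====

-- the loop equals the all() pass conjoined with the threshold on the any() flags
theorem pvLoop_eq (cs : List Char) (st : PySem.Set Char) (hu hl hd hs : Bool) :
    pvLoop cs st hu hl hd hs =
      ((cs.all fun c => PySem.Set.contains st c) &&
        decide (3 ≤ (if (hu || cs.any fun c => PySem.Chars.isupper c) then (1 : Nat) else 0)
                    + (if (hl || cs.any fun c => PySem.Chars.islower c) then 1 else 0)
                    + (if (hd || cs.any fun c => PySem.Chars.isdigit c) then 1 else 0)
                    + (if (hs || cs.any fun c => ['+', '/'].contains c) then 1 else 0))) := by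
  induction cs generalizing hu hl hd hs with
  | nil => simp [pvLoop]
  | cons c cs ih =>
      simp only [pvLoop, List.all_cons, List.any_cons]
      by_cases h : PySem.Set.contains st c = true
      · simp [ih, Bool.or_assoc, Bool.and_assoc]
      · have hf : c ∉ st := by simpa [PySem.Set.contains] using h
        simp [hf]

-- ===== VERDICT (by name: the statement is the Claim_ definition above) =====
set_option maxRecDepth 4000 in
theorem is_base64_string_spec : Claim_equal_is_base64_string := by
  intro s _
  unfold Spec_is_base64_string is_base64_string is_base64_string_alt
  simp only
  by_cases h1 : (s.toList.isEmpty || decide (s.toList.length < 4)) = true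
  · rw [if_pos h1, if_pos h1]
  · rw [if_neg h1, if_neg h1]
    by_cases h2 : (decide (4096 < s.toList.length)) = true
    · rw [if_pos h2, if_pos h2]
    · rw [if_neg h2, if_neg h2, pvLoop_eq]
      have hmod : ([0, 1, 2, 3].contains (s.toList.length % 4)) = true := by
        have hm : s.toList.length % 4 < 4 := Nat.mod_lt _ (by norm_num)
        simp only [List.contains_eq_mem, decide_eq_true_eq, List.mem_cons]
        omega
      by_cases hall : (s.toList.all fun c => PySem.Set.contains (PySem.Set.ofList pvB64) c) = true
      · have hne1 : (!(s.toList.all fun c => PySem.Set.contains (PySem.Set.ofList pvB64) c)) = false := by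
          rw [hall]; rfl
        have hne2 : (!([0, 1, 2, 3].contains (s.toList.length % 4))) = false := by
          rw [hmod]; rfl
        rw [hne1, if_neg Bool.false_ne_true, hne2, if_neg Bool.false_ne_true, hall, Bool.true_and]
        cases hA : s.toList.any fun c => PySem.Chars.isupper c <;>
        cases hB : s.toList.any fun c => PySem.Chars.islower c <;>
        cases hC : s.toList.any fun c => PySem.Chars.isdigit c <;>
        cases hD : s.toList.any fun c => ['+', '/'].contains c <;>
          rfl
      · rw [Bool.not_eq_true] at hall
        have hpos : (!(s.toList.all fun c => PySem.Set.contains (PySem.Set.ofList pvB64) c)) = true := by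
          rw [hall]; rfl
        rw [if_pos hpos, hall, Bool.false_and]
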